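-- pv_equiv track=rewrite | github.com/markramy23/Hive-Game | rules.py | FreedomToMove
-- ===== SOURCE A (Python) =====
-- def FreedomToMove(hex_map,Empty_Neighbours, AvailablePOSs):
--     s = set()
--     directions = [(+1, 0), (-1, 0), (0, +1), (0, -1), (+1, -1), (-1, +1)]
--     for AvailablePOS in AvailablePOSs :
--         Empty_Neighbours_ForAvailablePOS =[]
--         for  direction in directions:
--             Empty_Neighbours_ForAvailablePOS.append((AvailablePOS[0]+direction[0] , AvailablePOS[1]+direction[1]) )
--         for Empty_Neighbour_ForAvailablePOS in Empty_Neighbours_ForAvailablePOS :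
--             flag =0
--             for Empty_Neighbour in Empty_Neighbours :
--                 if Empty_Neighbour[0] == Empty_Neighbour_ForAvailablePOS[0] and  Empty_Neighbour[1] == Empty_Neighbour_ForAvailablePOS[1] :
--                     s.add( AvailablePOS)
--                     flag=1
--                     break
--
--             if flag ==1 :
--                 break
--
--
--     return s
-- ===== SOURCE B (Python) =====
-- def FreedomToMove(hex_map, Empty_Neighbours, AvailablePOSs):
--     directions = [(+1, 0), (-1, 0), (0, +1), (0, -1), (+1, -1), (-1, +1)]
--     # Every position that has some empty cell as a neighbor is itself a
--     # neighbor of some empty cell (the direction set is closed under negation):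
--     # precompute all neighbors of empty cells once, then filter AvailablePOSs.
--     candidates = set()
--     for e in Empty_Neighbours:
--         for d in directions:
--             candidates.add((e[0] + d[0], e[1] + d[1]))
--     s = set()
--     for p in AvailablePOSs:
--         if p in candidates:
--             s.add(p)
--     return s
-- ===== Notes on version B (the rewrite author's own statement) =====
-- stated objective: faster
-- what changed: Instead of scanning Empty_Neighbours for each of the six neighbors of each available position, B precomputes the set of all neighbors of empty cells once (valid because the six hex offsets are closed under negation) and then filters AvailablePOSs with one O(1) membership test each.
import Mathlib
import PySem

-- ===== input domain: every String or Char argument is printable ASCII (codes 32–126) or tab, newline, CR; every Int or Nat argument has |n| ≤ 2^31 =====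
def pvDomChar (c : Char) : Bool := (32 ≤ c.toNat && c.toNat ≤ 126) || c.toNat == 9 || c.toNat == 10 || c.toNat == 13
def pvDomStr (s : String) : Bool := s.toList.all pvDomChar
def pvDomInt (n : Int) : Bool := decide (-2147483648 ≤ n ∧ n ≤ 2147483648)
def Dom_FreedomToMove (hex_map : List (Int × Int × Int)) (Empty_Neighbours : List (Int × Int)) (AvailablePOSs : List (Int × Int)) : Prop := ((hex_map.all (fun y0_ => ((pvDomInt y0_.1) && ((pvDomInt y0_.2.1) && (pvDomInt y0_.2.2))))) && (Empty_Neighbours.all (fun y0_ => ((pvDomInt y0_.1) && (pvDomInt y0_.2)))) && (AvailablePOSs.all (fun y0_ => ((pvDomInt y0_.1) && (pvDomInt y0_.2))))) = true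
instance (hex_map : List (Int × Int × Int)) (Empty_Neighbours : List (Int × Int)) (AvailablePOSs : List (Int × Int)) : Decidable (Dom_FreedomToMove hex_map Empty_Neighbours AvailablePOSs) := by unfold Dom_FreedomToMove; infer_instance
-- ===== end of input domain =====

-- B replaces A's per-position scan of Empty_Neighbours by one precomputed set of all
-- neighbors of empty cells (the six offsets are negation-closed), O(n*m) -> O(n+m).

-- ===== PORT A =====
def pvDirections : List (Int × Int) := [(1, 0), (-1, 0), (0, 1), (0, -1), (1, -1), (-1, 1)]

-- inner 'for Empty_Neighbour in Empty_Neighbours: … break' loop (flag/break = first match found)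
def pvInnerFind (empties : List (Int × Int)) (c : Int × Int) : Bool :=
  match empties with
  | [] => false
  | e :: rest => if e.1 = c.1 ∧ e.2 = c.2 then true else pvInnerFind rest c

-- middle 'for Empty_Neighbour_ForAvailablePOS in …' loop with the flag-based break
def pvMidLoop (neigh : List (Int × Int)) (empties : List (Int × Int))
    (s : PySem.Set (Int × Int)) (p : Int × Int) : PySem.Set (Int × Int) :=
  match neigh with
  | [] => s
  | c :: rest =>
      if pvInnerFind empties c then PySem.Set.add s p else pvMidLoop rest empties s p

def FreedomToMove (hex_map : List (Int × Int × Int)) (Empty_Neighbours : List (Int × Int)) (AvailablePOSs : List (Int × Int)) : List (Int × Int) :=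
  AvailablePOSs.foldl
    (fun s p =>
      let neigh := pvDirections.map (fun d => (p.1 + d.1, p.2 + d.2))
      pvMidLoop neigh Empty_Neighbours s p)
    PySem.Set.empty

-- ===== PORT B =====
-- the candidate set: all neighbors of empty cells
def pvCandidates (Empty_Neighbours : List (Int × Int)) : PySem.Set (Int × Int) :=
  Empty_Neighbours.foldl
    (fun c e => pvDirections.foldl (fun c d => PySem.Set.add c (e.1 + d.1, e.2 + d.2)) c)
    PySem.Set.empty

def FreedomToMove_alt (hex_map : List (Int × Int × Int)) (Empty_Neighbours : List (Int × Int)) (AvailablePOSs : List (Int × Int)) : List (Int × Int) :=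
  let cand := pvCandidates Empty_Neighbours
  AvailablePOSs.foldl
    (fun s p => if PySem.Set.contains cand p then PySem.Set.add s p else s)
    PySem.Set.empty

-- ===== PRECONDITION & SPEC =====
def Spec_FreedomToMove (hex_map : List (Int × Int × Int)) (Empty_Neighbours : List (Int × Int)) (AvailablePOSs : List (Int × Int)) (out : List (Int × Int)) : Prop := out = FreedomToMove_alt hex_map Empty_Neighbours AvailablePOSs
instance (hex_map : List (Int × Int × Int)) (Empty_Neighbours : List (Int × Int)) (AvailablePOSs : List (Int × Int)) (out : List (Int × Int)) : Decidable (Spec_FreedomToMove hex_map Empty_Neighbours AvailablePOSs out) := by unfold Spec_FreedomToMove; infer_instance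

-- ===== CLAIM (what is proved, stated in full; the proofs are below) =====
def Claim_equal_FreedomToMove : Prop := ∀ (hex_map : List (Int × Int × Int)) (Empty_Neighbours : List (Int × Int)) (AvailablePOSs : List (Int × Int)), Dom_FreedomToMove hex_map Empty_Neighbours AvailablePOSs → Spec_FreedomToMove hex_map Empty_Neighbours AvailablePOSs (FreedomToMove hex_map Empty_Neighbours AvailablePOSs)

-- ===== LEMMAS AND PROOFS =====

theorem pvInnerFind_iff (empties : List (Int × Int)) (c : Int × Int) :
    pvInnerFind empties c = true ↔ c ∈ empties := by
  induction empties with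
  | nil => simp [pvInnerFind]
  | cons e rest ih =>
      simp only [pvInnerFind, List.mem_cons]
      split_ifs with h
      · obtain ⟨h1, h2⟩ := h
        simp [Prod.ext_iff, h1.symm, h2.symm]
      · rw [ih]
        constructor
        · exact Or.inr
        · rintro (rfl | hm)
          · exact absurd ⟨rfl, rfl⟩ h
          · exact hm

theorem pvMidLoop_eq (neigh empties : List (Int × Int)) (s : PySem.Set (Int × Int)) (p : Int × Int) :
    pvMidLoop neigh empties s p =
      if neigh.any (fun c => pvInnerFind empties c) then PySem.Set.add s p else s := by
  induction neigh with
  | nil => simp [pvMidLoop]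
  | cons c rest ih =>
      simp only [pvMidLoop, List.any_cons, ih]
      by_cases h : pvInnerFind empties c = true
      · simp [h]
      · rw [Bool.not_eq_true] at h
        simp only [h, Bool.false_or, Bool.false_eq_true, if_false]

theorem pvMem_candidates (emp : List (Int × Int)) (x : Int × Int) :
    x ∈ pvCandidates emp ↔ ∃ e ∈ emp, ∃ d ∈ pvDirections, x = (e.1 + d.1, e.2 + d.2) := by
  unfold pvCandidates
  induction emp using List.reverseRecOn with
  | nil => simp [PySem.Set.empty]
  | append_singleton l e ih =>
      rw [List.foldl_append]
      simp only [List.foldl_cons, List.foldl_nil, PySem.Set.mem_foldl_add, ih]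
      constructor
      · rintro (⟨a, ha, d, hd, rfl⟩ | ⟨d, hd, rfl⟩)
        · exact ⟨a, by simp [ha], d, hd, rfl⟩
        · exact ⟨e, by simp, d, hd, rfl⟩
      · rintro ⟨a, ha, d, hd, rfl⟩
        rcases List.mem_append.1 ha with ha | ha
        · exact Or.inl ⟨a, ha, d, hd, rfl⟩
        · simp only [List.mem_singleton] at ha
          subst ha
          exact Or.inr ⟨d, hd, rfl⟩

-- negation closure of the six offsets: p has an empty neighbor ↔ p is a neighbor of an empty cell
theorem pvBridge (emp : List (Int × Int)) (p : Int × Int) :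
    (∃ d ∈ pvDirections, (p.1 + d.1, p.2 + d.2) ∈ emp) ↔
      ∃ e ∈ emp, ∃ d ∈ pvDirections, p = (e.1 + d.1, e.2 + d.2) := by
  constructor
  · rintro ⟨d, hd, hm⟩
    refine ⟨(p.1 + d.1, p.2 + d.2), hm, (-d.1, -d.2), ?_, ?_⟩
    · simp only [pvDirections, List.mem_cons, List.not_mem_nil, or_false] at hd
      rcases hd with rfl | rfl | rfl | rfl | rfl | rfl <;> simp [pvDirections]
    · simp
  · rintro ⟨e, he, d, hd, rfl⟩
    refine ⟨(-d.1, -d.2), ?_, ?_⟩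
    · simp only [pvDirections, List.mem_cons, List.not_mem_nil, or_false] at hd
      rcases hd with rfl | rfl | rfl | rfl | rfl | rfl <;> simp [pvDirections]
    · have : (e.1 + d.1 + -d.1, e.2 + d.2 + -d.2) = e := by
        simp
      rw [this]; exact he

theorem pvCond_eq (emp : List (Int × Int)) (p : Int × Int) :
    (pvDirections.map (fun d => (p.1 + d.1, p.2 + d.2))).any (fun c => pvInnerFind emp c) =
      PySem.Set.contains (pvCandidates emp) p := by
  rw [Bool.eq_iff_iff]
  rw [PySem.Set.contains_iff, pvMem_candidates]
  rw [← pvBridge emp p]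
  simp only [List.any_eq_true, List.mem_map]
  constructor
  · rintro ⟨c, ⟨d, hd, rfl⟩, hf⟩
    exact ⟨d, hd, (pvInnerFind_iff _ _).1 hf⟩
  · rintro ⟨d, hd, hm⟩
    exact ⟨_, ⟨d, hd, rfl⟩, (pvInnerFind_iff _ _).2 hm⟩

-- ===== VERDICT (by name: the statement is the Claim_ definition above) =====
theorem FreedomToMove_spec : Claim_equal_FreedomToMove := by
  intro hex_map emp avail _
  unfold Spec_FreedomToMove FreedomToMove FreedomToMove_alt
  congr 1
  funext s p
  simp only [pvMidLoop_eq, pvCond_eq]
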